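-- pv_equiv track=rewrite | github.com/yffily/square-1 | square1/_shape.py | turn_shape
-- ===== SOURCE A (Python) =====
-- def turn_shape(f,i):
--     i = i%12
--     a = 0
--     for j in range(len(f)):
--         if a==i:
--             return f[j:]+f[:j]
--         if a>i:
--             return None
-- #             raise Exception('Forbiden turn (no face/slit alignment).')
--         a += f[j]
-- ===== SOURCE B (Python) =====
-- def turn_shape(f, i):
--     r = i % 12            # remaining turn amount to consume
--     tail = f[::-1]        # unconsumed suffix, reversed so pop() takes its first piece
--     head = []             # pieces already moved behind the cut, in order
--     while tail:
--         if r < 0: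
--             return None
--         if r == 0:
--             return tail[::-1] + head
--         head.append(tail.pop())
--         r -= head[-1]
--     return None
-- ===== Notes on version B (the rewrite author's own statement) =====
-- stated objective: alternative
-- what changed: B walks a two-stack state (a reversed suffix stack popped piece by piece onto the rotated head) while counting the turn amount down to zero, and returns the rotation it has assembled, instead of A's indexed loop that accumulates prefix sums up to i%12 and slices the list at the matching index.
import Mathlib
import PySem

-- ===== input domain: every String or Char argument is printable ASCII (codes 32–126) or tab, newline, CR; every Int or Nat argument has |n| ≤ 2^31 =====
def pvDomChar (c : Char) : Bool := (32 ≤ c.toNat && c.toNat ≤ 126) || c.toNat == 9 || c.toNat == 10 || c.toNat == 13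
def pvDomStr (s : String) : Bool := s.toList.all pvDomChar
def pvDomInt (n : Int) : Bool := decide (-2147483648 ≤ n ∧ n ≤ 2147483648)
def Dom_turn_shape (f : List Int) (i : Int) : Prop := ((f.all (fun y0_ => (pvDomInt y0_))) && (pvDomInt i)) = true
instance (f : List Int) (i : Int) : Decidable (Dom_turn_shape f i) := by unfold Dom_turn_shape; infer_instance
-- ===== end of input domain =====

-- B replaces A's indexed running-sum scan (accumulate up to i, then slice) by a two-stack
-- walk that counts the turn amount down to zero while moving pieces from a reversed
-- suffix stack onto the rotated head (objective: alternative; same cost).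


-- ===== PORT A =====
-- the 'for j in range(len(f))' loop with early returns, as index recursion
def turnShapeLoop (f : List Int) (i : Int) (a : Int) (j : Nat) : Option (List Int) :=
  if j < f.length then
    if a = i then some (PySem.List.slice f (some (j : Int)) none ++ PySem.List.slice f none (some (j : Int)))
    else if a > i then none
    else turnShapeLoop f i (a + ((PySem.List.pyGet? f (j : Int)).getD 0)) (j + 1)
  else none
termination_by f.length - j

def turn_shape (f : List Int) (i : Int) : Option (List Int) :=
  let i := PySem.Int.mod i 12
  turnShapeLoop f i 0 0

-- ===== PORT B =====
-- Source B's 'while tail:' loop; tail[::-1] is tail.reverse (PySem.List.slice?_none_none_neg_one),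
-- tail.pop() is PySem.List.pop? tail (default index -1), and head[-1] is the x just appended.
def turnShapeGo (head tail : List Int) (r : Int) : Option (List Int) :=
  if tail.isEmpty then none
  else if r < 0 then none
  else if r = 0 then some (tail.reverse ++ head)
  else
    match h : PySem.List.pop? tail with
    | none => none   -- unreachable: tail is nonempty
    | some (x, rest) => turnShapeGo (head ++ [x]) rest (r - x)
termination_by tail.length
decreasing_by have := PySem.List.length_of_pop?_eq_some tail h; simp at this; omega

def turn_shape_alt (f : List Int) (i : Int) : Option (List Int) :=
  let r := PySem.Int.mod i 12
  turnShapeGo [] f.reverse r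

-- ===== PRECONDITION & SPEC =====
def Spec_turn_shape (f : List Int) (i : Int) (out : Option (List Int)) : Prop := out = turn_shape_alt f i
instance (f : List Int) (i : Int) (out : Option (List Int)) : Decidable (Spec_turn_shape f i out) := by unfold Spec_turn_shape; infer_instance

-- ===== CLAIM (what is proved, stated in full; the proofs are below) =====
def Claim_equal_turn_shape : Prop := ∀ (f : List Int) (i : Int), Dom_turn_shape f i → Spec_turn_shape f i (turn_shape f i)

-- ===== LEMMAS AND PROOFS =====

-- A's loop at index j with accumulator a equals B's two-stack countdown walk on the
-- reversed remaining suffix, with head = the pieces already passed and r = i - a.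
lemma turnShapeLoop_eq_go (rest : List Int) : ∀ (f : List Int) (i a : Int) (j : Nat),
    f.drop j = rest →
    turnShapeLoop f i a j = turnShapeGo (f.take j) rest.reverse (i - a) := by
  induction rest with
  | nil =>
    intro f i a j hdrop
    have hj : f.length ≤ j := by
      by_contra h
      have := List.drop_eq_nil_iff.mp hdrop
      omega
    rw [turnShapeLoop, turnShapeGo.eq_def]
    simp [Nat.not_lt.mpr hj]
  | cons x t ih =>
    intro f i a j hdrop
    have hj : j < f.length := by
      by_contra h
      rw [List.drop_eq_nil_of_le (by omega)] at hdrop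
      exact List.cons_ne_nil x t hdrop.symm
    have hget : f[j]? = some x := by
      have h0 : (List.drop j f)[0]? = f[j + 0]? := List.getElem?_drop
      rw [hdrop] at h0
      simpa using h0.symm
    rw [turnShapeLoop, turnShapeGo.eq_def]
    have hne : ¬ (((x :: t).reverse).isEmpty = true) := by simp
    rw [if_pos hj, if_neg hne]
    by_cases hai : a = i
    · -- a == i: A rotates at j; B sees r = 0 and returns tail.reverse ++ head
      subst hai
      rw [if_pos rfl, if_neg (by omega : ¬ (a - a < 0)), if_pos (by omega : a - a = 0)]
      simp [PySem.List.slice_from_natCast, PySem.List.slice_to_natCast, hdrop]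
    · by_cases hgt : a > i
      · -- a > i: both return none (r = i - a < 0)
        rw [if_neg hai, if_pos hgt, if_pos (by omega : i - a < 0)]
      · -- a < i: both recurse; B pops x (the first remaining piece) off the stack
        rw [if_neg hai, if_neg hgt, if_neg (by omega : ¬ (i - a < 0)),
          if_neg (by omega : ¬ (i - a = 0))]
        rw [List.reverse_cons]
        split
        · next heq => rw [PySem.List.pop?_last] at heq; cases heq
        · next x' rest heq =>
          rw [PySem.List.pop?_last] at heq
          simp only [Option.some.injEq, Prod.mk.injEq] at heq
          obtain ⟨rfl, rfl⟩ := heq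
          have hdrop' : f.drop (j + 1) = t := by
            rw [← List.drop_drop, hdrop]; rfl
          have htake : f.take (j + 1) = f.take j ++ [x] := by
            rw [List.take_add_one, hget]; rfl
          simp only [PySem.List.pyGet?_natCast, hget, Option.getD_some]
          rw [ih f i (a + x) (j + 1) hdrop', htake]
          ring_nf

-- ===== VERDICT (by name: the statement is the Claim_ definition above) =====
theorem turn_shape_spec : Claim_equal_turn_shape := by
  intro f i _
  unfold Spec_turn_shape turn_shape turn_shape_alt
  have := turnShapeLoop_eq_go f f (PySem.Int.mod i 12) 0 0 (by simp)
  simpa using this
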